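-- pv_equiv track=rewrite | github.com/maxdinech/perso | tpalgo1.py | marches
-- ===== SOURCE A (Python) =====
-- def x(n):
--     if n in [7, 0, 1]:
--         return 1
--     elif n in [3, 4, 5]:
--         return -1
--     else:
--         return 0
--
-- def y(n):
--     if n in [1, 2, 3]:
--         return 1
--     elif n in [5, 6, 7]:
--         return -1
--     else:
--         return 0
--
-- def pas(p):
--     return (x(p), y(p))
--
-- def marches(P, n):
--     tab = []
--     def etape(marche, paas, k):
--         pos = (marche[-1][0] + paas[0], marche[-1][1] + paas[1])
--         if pos[0] >= 0 and pos [1] >= 0: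
--             marche = marche + [pos]
--             if k == 0:
--                 tab.append(marche)
--             else:
--                 for p in P:
--                     etape(marche, pas(p), k-1)
--     for p in P:
--         etape([(0, 0)], pas(p), n-1)
--     return tab
-- ===== SOURCE B (Python) =====
-- def x(n):
--     if n in [7, 0, 1]:
--         return 1
--     elif n in [3, 4, 5]:
--         return -1
--     else:
--         return 0
--
-- def y(n):
--     if n in [1, 2, 3]:
--         return 1
--     elif n in [5, 6, 7]:
--         return -1
--     else:
--         return 0
--
-- def marches(P, n):
--     frontier = [[(0, 0)]]
--     for _ in range(n):
--         nxt = []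
--         for walk in frontier:
--             cx, cy = walk[-1]
--             for p in P:
--                 pos = (cx + x(p), cy + y(p))
--                 if pos[0] >= 0 and pos[1] >= 0:
--                     nxt.append(walk + [pos])
--         frontier = nxt
--     return frontier
-- ===== Notes on version B (the rewrite author's own statement) =====
-- stated objective: simpler
-- what changed: Replaces A's nested-closure depth-first recursion (etape mutating an outer tab) with an iterative breadth-first frontier: start from [[(0,0)]] and expand it n times level by level, which yields the same lexicographically ordered walk list.
-- intended difference: For n <= 0 (where A does not recurse forever, i.e. every step of P leaves the quadrant immediately) A returns [] because its k = n-1 recursion never reaches the k == 0 collection point, while B returns [[(0, 0)]], the single 0-step walk, which is the intended enumeration of 0-step quadrant walks. — e.g. on marches([3], 0): A returns [], B returns [[(0, 0)]]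
import Mathlib
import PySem

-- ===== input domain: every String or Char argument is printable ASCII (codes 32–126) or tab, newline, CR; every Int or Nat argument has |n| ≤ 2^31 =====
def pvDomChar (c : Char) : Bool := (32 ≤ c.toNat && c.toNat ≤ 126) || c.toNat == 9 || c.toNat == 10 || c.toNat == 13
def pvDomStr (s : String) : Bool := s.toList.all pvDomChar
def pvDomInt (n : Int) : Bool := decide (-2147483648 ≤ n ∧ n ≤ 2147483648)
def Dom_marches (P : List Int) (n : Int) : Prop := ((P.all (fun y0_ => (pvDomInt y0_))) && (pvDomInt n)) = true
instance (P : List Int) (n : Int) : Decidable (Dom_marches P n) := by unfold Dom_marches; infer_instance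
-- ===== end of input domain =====

-- B replaces A's nested-closure depth-first recursion by an iterative level-by-level
-- frontier expansion (same order, same cost); for n ≤ 0 B returns the single 0-step walk
-- where A returns [] (stated as D_) or raises RecursionError (excluded by Pre_).

-- ===== PORT A =====
def xA (n : Int) : Int :=
  if n ∈ ([7, 0, 1] : List Int) then 1
  else if n ∈ ([3, 4, 5] : List Int) then -1
  else 0

def yA (n : Int) : Int :=
  if n ∈ ([1, 2, 3] : List Int) then 1
  else if n ∈ ([5, 6, 7] : List Int) then -1
  else 0

def pasA (p : Int) : Int × Int := (xA p, yA p)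

-- etape's counter k is modeled as a Nat (k = n-1 at the top call); inside Pre_marches
-- (n ≥ 1, or a P on which the loop body never recurses) this is exact.
def etapeA (P : List Int) (marche : List (Int × Int)) (paas : Int × Int) (k : Nat)
    (tab : List (List (Int × Int))) : List (List (Int × Int)) :=
  -- marche[-1]: marche is nonempty on every call, getD is never taken
  let last := (PySem.List.pyGet? marche (-1)).getD (0, 0)
  let pos : Int × Int := (last.1 + paas.1, last.2 + paas.2)
  if pos.1 ≥ 0 ∧ pos.2 ≥ 0 then
    let marche := marche ++ [pos]
    match k with                            -- 'if k == 0', structurally on the Nat counter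
    | 0 => tab ++ [marche]
    | k' + 1 => P.foldl (fun tab p => etapeA P marche (pasA p) k' tab) tab
  else tab

def marches (P : List Int) (n : Int) : List (List (Int × Int)) :=
  P.foldl (fun tab p => etapeA P [(0, 0)] (pasA p) (n - 1).toNat tab) []

-- ===== PORT B =====
def xB (n : Int) : Int :=
  if n ∈ ([7, 0, 1] : List Int) then 1
  else if n ∈ ([3, 4, 5] : List Int) then -1
  else 0

def yB (n : Int) : Int :=
  if n ∈ ([1, 2, 3] : List Int) then 1
  else if n ∈ ([5, 6, 7] : List Int) then -1
  else 0

def marches_alt (P : List Int) (n : Int) : List (List (Int × Int)) :=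
  (List.range n.toNat).foldl
    (fun frontier _ =>
      frontier.foldl
        (fun nxt walk =>
          -- walk[-1]: every frontier walk is nonempty, getD is never taken
          let c := (PySem.List.pyGet? walk (-1)).getD (0, 0)
          P.foldl
            (fun nxt p =>
              let pos : Int × Int := (c.1 + xB p, c.2 + yB p)
              if pos.1 ≥ 0 ∧ pos.2 ≥ 0 then nxt ++ [walk ++ [pos]] else nxt)
            nxt)
        [])
    [[(0, 0)]]

-- ===== PRECONDITION & SPEC =====
-- Pre_ excludes exactly the inputs on which A raises RecursionError: n ≤ 0 together with
-- some p ∈ P whose step keeps both coordinates ≥ 0, so the k = n-1 recursion never stops.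
def Pre_marches (P : List Int) (n : Int) : Prop :=
  1 ≤ n ∨ ∀ p ∈ P, p = 3 ∨ p = 4 ∨ p = 5 ∨ p = 6 ∨ p = 7
instance (P : List Int) (n : Int) : Decidable (Pre_marches P n) := by
  unfold Pre_marches; infer_instance

def pvWitness_marches : List Int × Int := ([0, 1, 2], 2)

-- For n ≤ 0 with every step of P leaving the quadrant at once, A returns [] because its
-- k = n-1 recursion never reaches the k == 0 collection point, while B returns [[(0, 0)]],
-- the single 0-step walk, which is the intended enumeration of 0-step quadrant walks.
def D_marches (P : List Int) (n : Int) : Prop := n ≤ 0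
instance (P : List Int) (n : Int) : Decidable (D_marches P n) := by
  unfold D_marches; infer_instance

def Spec_marches (P : List Int) (n : Int) (out : List (List (Int × Int))) : Prop :=
  ¬ D_marches P n → out = marches_alt P n
instance (P : List Int) (n : Int) (out : List (List (Int × Int))) :
    Decidable (Spec_marches P n out) := by unfold Spec_marches; infer_instance

def pvDiffWitness_marches : List Int × Int := ([3], 0)
def pvDiffWitnessOut_marches :
    (List (List (Int × Int))) × (List (List (Int × Int))) := ([], [[(0, 0)]])

-- ===== CLAIM =====
def Claim_unchanged_marches : Prop :=
  ∀ (P : List Int) (n : Int), Dom_marches P n → Pre_marches P n →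
    Spec_marches P n (marches P n)
def Claim_changed_marches : Prop :=
  Dom_marches (pvDiffWitness_marches.1) (pvDiffWitness_marches.2) ∧
  Pre_marches (pvDiffWitness_marches.1) (pvDiffWitness_marches.2) ∧
  D_marches (pvDiffWitness_marches.1) (pvDiffWitness_marches.2) ∧
  marches (pvDiffWitness_marches.1) (pvDiffWitness_marches.2) = pvDiffWitnessOut_marches.1 ∧
  marches_alt (pvDiffWitness_marches.1) (pvDiffWitness_marches.2) = pvDiffWitnessOut_marches.2 ∧
  pvDiffWitnessOut_marches.1 ≠ pvDiffWitnessOut_marches.2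
def Claim_exact_marches : Prop :=
  ∀ (P : List Int) (n : Int), Dom_marches P n → Pre_marches P n → D_marches P n →
    marches P n ≠ marches_alt P n
-- ===== LEMMAS AND PROOFS =====

-- common spec: one-step extension of a walk, one BFS round, k iterated rounds
def ext1 (w : List (Int × Int)) (paas : Int × Int) : List (List (Int × Int)) :=
  let c := (PySem.List.pyGet? w (-1)).getD (0, 0)
  let pos : Int × Int := (c.1 + paas.1, c.2 + paas.2)
  if pos.1 ≥ 0 ∧ pos.2 ≥ 0 then [w ++ [pos]] else []

def roundP (P : List Int) (fr : List (List (Int × Int))) : List (List (Int × Int)) :=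
  fr.flatMap (fun w => P.flatMap (fun p => ext1 w (pasA p)))

def iterRound (P : List Int) : Nat → List (List (Int × Int)) → List (List (Int × Int))
  | 0, fr => fr
  | k + 1, fr => iterRound P k (roundP P fr)

theorem roundP_append (P : List Int) (a b : List (List (Int × Int))) :
    roundP P (a ++ b) = roundP P a ++ roundP P b := by
  simp [roundP]

theorem iterRound_nil (P : List Int) (k : Nat) : iterRound P k [] = [] := by
  induction k with
  | zero => rfl
  | succ k ih => simp [iterRound, roundP, ih]

theorem iterRound_append (P : List Int) (k : Nat) :
    ∀ a b, iterRound P k (a ++ b) = iterRound P k a ++ iterRound P k b := by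
  induction k with
  | zero => intro a b; rfl
  | succ k ih => intro a b; simp [iterRound, roundP_append, ih]

theorem flatMap_iterRound (P : List Int) (k : Nat)
    (g : Int → List (List (Int × Int))) :
    ∀ L : List Int, L.flatMap (fun x => iterRound P k (g x)) = iterRound P k (L.flatMap g) := by
  intro L
  induction L with
  | nil => simp [iterRound_nil]
  | cons x L ih => simp [List.flatMap_cons, iterRound_append, ih]

theorem iterRound_succ' (P : List Int) (k : Nat) :
    ∀ fr, iterRound P (k + 1) fr = roundP P (iterRound P k fr) := by
  induction k with
  | zero => intro fr; rfl
  | succ k ih => intro fr; simpa [iterRound] using ih (roundP P fr)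

theorem etapeA_eq (P : List Int) (k : Nat) :
    ∀ (marche : List (Int × Int)) (paas : Int × Int) (tab : List (List (Int × Int))),
      etapeA P marche paas k tab = tab ++ iterRound P k (ext1 marche paas) := by
  induction k with
  | zero =>
    intro marche paas tab
    simp only [etapeA, ext1, iterRound]
    split <;> simp
  | succ k ih =>
    intro marche paas tab
    rw [etapeA]
    dsimp only
    simp only [ext1, iterRound]
    split
    · rw [show (fun (tab : List (List (Int × Int))) (p : Int) =>
            etapeA P (marche ++ [(((PySem.List.pyGet? marche (-1)).getD (0, 0)).1 + paas.1,
              ((PySem.List.pyGet? marche (-1)).getD (0, 0)).2 + paas.2)]) (pasA p) k tab)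
          = (fun tab p => tab ++ iterRound P k (ext1 (marche ++
              [(((PySem.List.pyGet? marche (-1)).getD (0, 0)).1 + paas.1,
                ((PySem.List.pyGet? marche (-1)).getD (0, 0)).2 + paas.2)]) (pasA p))) from
          funext fun tab => funext fun p => ih _ _ tab]
      rw [PySem.List.foldl_append_eq_flatMap]
      rw [flatMap_iterRound]
      simp [roundP]
    · simp [roundP, iterRound_nil]

theorem marches_eq (P : List Int) (n : Int) :
    marches P n = iterRound P ((n - 1).toNat + 1) [[(0, 0)]] := by
  unfold marches
  rw [show (fun (tab : List (List (Int × Int))) (p : Int) =>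
        etapeA P [(0, 0)] (pasA p) (n - 1).toNat tab)
      = (fun tab p => tab ++ iterRound P (n - 1).toNat (ext1 [(0, 0)] (pasA p))) from
      funext fun tab => funext fun p => etapeA_eq P _ _ _ tab]
  rw [PySem.List.foldl_append_eq_flatMap]
  rw [flatMap_iterRound]
  simp [iterRound, roundP]

theorem b_inner (P : List Int) (walk : List (Int × Int)) :
    ∀ nxt, P.foldl (fun nxt p =>
        let c := (PySem.List.pyGet? walk (-1)).getD (0, 0)
        let pos : Int × Int := (c.1 + xB p, c.2 + yB p)
        if pos.1 ≥ 0 ∧ pos.2 ≥ 0 then nxt ++ [walk ++ [pos]] else nxt) nxt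
      = nxt ++ P.flatMap (fun p => ext1 walk (pasA p)) := by
  induction P with
  | nil => intro nxt; simp
  | cons p P ih =>
    intro nxt
    simp only [List.foldl_cons, List.flatMap_cons, ih]
    have hx : xB p = xA p := rfl
    have hy : yB p = yA p := rfl
    simp only [ext1, pasA, hx, hy]
    split <;> simp

theorem marches_alt_eq (P : List Int) (n : Int) :
    marches_alt P n = iterRound P n.toNat [[(0, 0)]] := by
  unfold marches_alt
  rw [show (fun (frontier : List (List (Int × Int))) (_ : Nat) =>
        frontier.foldl (fun nxt walk =>
          let c := (PySem.List.pyGet? walk (-1)).getD (0, 0)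
          P.foldl (fun nxt p =>
            let pos : Int × Int := (c.1 + xB p, c.2 + yB p)
            if pos.1 ≥ 0 ∧ pos.2 ≥ 0 then nxt ++ [walk ++ [pos]] else nxt) nxt) [])
      = (fun frontier _ => roundP P frontier) from
      funext fun frontier => funext fun _ => by
        rw [show (fun (nxt : List (List (Int × Int))) (walk : List (Int × Int)) =>
              let c := (PySem.List.pyGet? walk (-1)).getD (0, 0)
              P.foldl (fun nxt p =>
                let pos : Int × Int := (c.1 + xB p, c.2 + yB p)
                if pos.1 ≥ 0 ∧ pos.2 ≥ 0 then nxt ++ [walk ++ [pos]] else nxt) nxt)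
            = (fun nxt walk => nxt ++ P.flatMap (fun p => ext1 walk (pasA p))) from
            funext fun nxt => funext fun walk => b_inner P walk nxt]
        rw [PySem.List.foldl_append_eq_flatMap]
        simp [roundP]]
  induction n.toNat with
  | zero => rfl
  | succ k ih => rw [List.range_succ, List.foldl_append, ih, List.foldl_cons, List.foldl_nil,
      ← iterRound_succ']

-- on the D_ region admitted by Pre_, every first step leaves the quadrant, so A collects nothing
theorem etapeA_dead (P : List Int) (k : Nat) (p : Int)
    (hp : p = 3 ∨ p = 4 ∨ p = 5 ∨ p = 6 ∨ p = 7) (tab : List (List (Int × Int))) :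
    etapeA P [(0, 0)] (pasA p) k tab = tab := by
  rcases hp with h | h | h | h | h <;> subst h <;>
    cases k <;> simp [etapeA, pasA, xA, yA, PySem.List.pyGet?, PySem.List.pyIdx?]

theorem marches_dead (P : List Int) (n : Int)
    (hP : ∀ p ∈ P, p = 3 ∨ p = 4 ∨ p = 5 ∨ p = 6 ∨ p = 7) :
    marches P n = [] := by
  unfold marches
  rw [PySem.List.foldl_congr_mem _ _ (fun tab _ => tab) _
      (fun tab p hp => etapeA_dead P _ p (hP p hp) tab), PySem.List.foldl_ignore]

theorem marches_spec : Claim_unchanged_marches := by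
  intro P n _ _ hD
  have hn : 1 ≤ n := by
    by_contra h
    exact hD (by unfold D_marches; omega)
  rw [marches_eq, marches_alt_eq]
  congr 1
  omega

theorem marches_changed : Claim_changed_marches := by unfold Claim_changed_marches; decide

theorem marches_tight : Claim_exact_marches := by
  intro P n _ hPre hD
  have hn : n ≤ 0 := hD
  rcases hPre with h1 | hP
  · omega
  · rw [marches_dead P n hP, marches_alt_eq]
    have : n.toNat = 0 := by omega
    rw [this]
    simp [iterRound]
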